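-- pv_equiv track=rewrite | github.com/shtylenko-meta/rubik-emulator7 | rubiks_emulator.py | decode_co
-- ===== SOURCE A (Python) =====
-- from typing import Dict, List, Tuple, Optional, Any
--
-- def decode_co(n: int) -> List[int]:
--     """Decode corner orientation index to 8-element list."""
--     co = [0] * 8
--     s = 0
--     for i in range(6, -1, -1):
--         co[i] = n % 3
--         n //= 3
--         s += co[i]
--     co[7] = (3 - s % 3) % 3
--     return co
-- ===== SOURCE B (Python) =====
-- from typing import Dict, List, Tuple, Optional, Any
--
-- def decode_co(n: int) -> List[int]:
--     """Decode corner orientation index to 8-element list."""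
--     co = [(n // 3 ** (6 - i)) % 3 for i in range(7)]
--     co.append((-sum(co)) % 3)
--     return co
-- ===== Notes on version B (the rewrite author's own statement) =====
-- stated objective: alternative
-- what changed: B extracts each of the seven low base-three digits independently by dividing by the positional power, and computes the parity digit from one aggregate sum, instead of threading a running quotient and a running sum through a backwards loop.
import Mathlib
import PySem

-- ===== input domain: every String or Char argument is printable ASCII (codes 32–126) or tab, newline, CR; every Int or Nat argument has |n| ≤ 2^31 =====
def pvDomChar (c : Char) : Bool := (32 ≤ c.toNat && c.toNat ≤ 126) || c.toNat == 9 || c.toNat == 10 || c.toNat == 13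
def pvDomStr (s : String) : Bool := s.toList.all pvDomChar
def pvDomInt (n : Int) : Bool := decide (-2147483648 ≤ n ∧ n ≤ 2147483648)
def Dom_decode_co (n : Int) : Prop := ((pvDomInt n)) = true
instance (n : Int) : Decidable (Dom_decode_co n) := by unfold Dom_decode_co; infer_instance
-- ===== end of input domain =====

-- B replaces A's sequential quotient/sum accumulators with independent per-position digit extraction plus one aggregate parity sum (alternative decomposition, same cost).
-- ===== PORT A =====
-- literal port of A: backwards loop i = 6..0 mutating co, running quotient n //= 3, running sum s
def decode_co (n : Int) : List Int :=
  let co : List Int := List.replicate 8 0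
  let st := (PySem.List.pyRange 6 (-1) (-1)).foldl
    (fun (st : List Int × Int × Int) i =>
      let co := st.1; let n := st.2.1; let s := st.2.2
      let d := PySem.Int.mod n 3
      (co.set i.toNat d, PySem.Int.floordiv n 3, s + d))
    (co, n, 0)
  st.1.set 7 (PySem.Int.mod (3 - PySem.Int.mod st.2.2 3) 3)

-- ===== PORT B =====
-- literal port of B: independent per-position digit extraction plus one aggregate parity digit
def decode_co_alt (n : Int) : List Int :=
  let co := (PySem.List.pyRange 0 7 1).map
    (fun i => PySem.Int.mod (PySem.Int.floordiv n ((3:Int) ^ (6 - i).toNat)) 3)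
  co ++ [PySem.Int.mod (-(co.sum)) 3]

-- ===== PRECONDITION & SPEC =====
def Spec_decode_co (n : Int) (out : List Int) : Prop := out = decode_co_alt n
instance (n : Int) (out : List Int) : Decidable (Spec_decode_co n out) := by unfold Spec_decode_co; infer_instance

-- ===== CLAIM (what is proved, stated in full; the proofs are below) =====
def Claim_equal_decode_co : Prop := ∀ (n : Int), Dom_decode_co n → Spec_decode_co n (decode_co n)

-- ===== LEMMAS AND PROOFS =====

-- ===== VERDICT (by name: the statement is the Claim_ definition above) =====
theorem decode_co_spec : Claim_equal_decode_co := by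
  intro n _
  unfold Spec_decode_co decode_co decode_co_alt
  have h1 : PySem.List.pyRange 6 (-1) (-1) = [6, 5, 4, 3, 2, 1, 0] := by decide
  have h2 : PySem.List.pyRange 0 7 1 = [0, 1, 2, 3, 4, 5, 6] := by decide
  simp only [h1, h2, List.foldl, List.map, List.replicate, List.sum_cons,
    List.sum_nil, List.cons_append, List.nil_append]
  norm_num [PySem.Int.mod_eq_emod_of_pos, PySem.Int.floordiv_eq_ediv_of_pos, List.set]
  have hset : ∀ (a b c d e f g p : Int),
      ((((((((([0,0,0,0,0,0,0,0] : List Int).set 6 a).set 5 b).set 4 c).set 3 d).set 2 e).set 1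
            f).set 0 g).set 7 p) = [g, f, e, d, c, b, a, p] := by
    intro a b c d e f g p; rfl
  simp only [show Int.toNat (6:Int) = 6 from rfl, show Int.toNat (5:Int) = 5 from rfl,
    show Int.toNat (4:Int) = 4 from rfl, show Int.toNat (3:Int) = 3 from rfl,
    show Int.toNat (2:Int) = 2 from rfl, hset]
  have d2 : n / 3 / 3 = n / 9 := by omega
  have d3 : n / 9 / 3 = n / 27 := by omega
  have d4 : n / 27 / 3 = n / 81 := by omega
  have d5 : n / 81 / 3 = n / 243 := by omega
  have d6 : n / 243 / 3 = n / 729 := by omega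
  norm_num [List.cons.injEq, d2, d3, d4, d5, d6]
  omega
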